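-- pv_equiv track=rewrite | github.com/nguyenthaidinh/RAG | app/nlp/tokenizer.py | _split_words_windowed
-- ===== SOURCE A (Python) =====
-- from typing import Sequence
--
-- def _split_words_windowed(
--     words: Sequence[str],
--     max_words: int,
--     overlap_words: int,
-- ) -> list[str]:
--     """Sliding-window split over a word list."""
--     if not words:
--         return []
--     step = max(1, max_words - overlap_words)
--     segments: list[str] = []
--     for start in range(0, len(words), step):
--         end = min(start + max_words, len(words))
--         segments.append(" ".join(words[start:end]))
--         if end >= len(words):
--             break
--     return segments
-- ===== SOURCE B (Python) =====
-- def _split_words_windowed(words, max_words, overlap_words):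
--     """Sliding-window split over a word list, by consuming suffixes: emit the
--     head window, drop `step` words, repeat; the last (short) suffix is emitted whole."""
--     step = max(1, max_words - overlap_words)
--     k = max(0, max_words)
--     segments = []
--     ws = list(words)
--     while len(ws) > k:
--         segments.append(" ".join(ws[:k]))
--         ws = ws[step:]
--     if ws:
--         segments.append(" ".join(ws))
--     return segments
-- ===== Notes on version B (the rewrite author's own statement) =====
-- stated objective: alternative
-- what changed: B replaces A's index loop over range(0, len, step) with its dynamic end>=len break by recursion on the list structure: consume suffixes, emitting the head window ws[:k] and dropping step words while more than a window remains, then emit the last short suffix whole.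
-- intended difference: For max_words < 0 with len(words) + max_words >= 1, A's end = start + max_words is a negative slice bound so Python wraps it around and A returns segments taken from the end of the list (e.g. ['a b','','']), while B returns the all-empty segments a non-positive window size means (['','','']), the intended reading; the wraparound is an accident of slicing. — e.g. on _split_words_windowed(["a", "b", "c"], -1, 0): A returns ["a b", "", ""], B returns ["", "", ""]
import Mathlib
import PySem

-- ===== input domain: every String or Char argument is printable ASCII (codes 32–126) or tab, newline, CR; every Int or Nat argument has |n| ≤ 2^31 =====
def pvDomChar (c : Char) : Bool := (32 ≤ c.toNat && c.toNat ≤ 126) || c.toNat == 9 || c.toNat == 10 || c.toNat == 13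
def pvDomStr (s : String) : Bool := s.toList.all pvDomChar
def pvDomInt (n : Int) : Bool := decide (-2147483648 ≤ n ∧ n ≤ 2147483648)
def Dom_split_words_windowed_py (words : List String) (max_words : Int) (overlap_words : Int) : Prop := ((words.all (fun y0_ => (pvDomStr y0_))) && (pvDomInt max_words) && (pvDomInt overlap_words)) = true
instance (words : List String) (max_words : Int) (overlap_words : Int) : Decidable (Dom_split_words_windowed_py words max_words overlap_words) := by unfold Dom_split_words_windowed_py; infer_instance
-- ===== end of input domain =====

-- B consumes the word list by suffixes (emit head window, drop step words, repeat; last short suffix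
-- emitted whole) instead of A's index loop over range(0, len, step) with a break; alternative decomposition,
-- same cost. On max_words < 0 with len(words) + max_words >= 1 A's negative slice end wraps around
-- (an artefact of Python slicing) while B returns empty segments; stated as D_ below.


-- ===== PORT A =====
-- A's for-loop over range(0, len(words), step) with the 'if end >= len(words): break'
def pvLoopA (words : List String) (mw L : Int) : List Int → List String
  | [] => []
  | start :: rest =>
    let e := min (start + mw) L
    let seg := PySem.Str.join " " (PySem.List.slice words (some start) (some e))
    if L ≤ e then [seg] else seg :: pvLoopA words mw L rest

def split_words_windowed_py (words : List String) (max_words : Int) (overlap_words : Int) : List String :=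
  match words with
  | [] => []
  | _ :: _ =>
    let step := max 1 (max_words - overlap_words)
    pvLoopA words max_words (words.length : Int) (PySem.List.pyRange 0 (words.length : Int) step)

-- ===== PORT B =====
-- B's while loop: while len(ws) > k: emit join(ws[:k]); ws = ws[step:]; then if ws: emit join(ws).
-- k and step are nonnegative resp. positive Nats here, so ws[:k] is List.take k and ws[step:] is
-- List.drop step (exact: PySem.List.slice_to_natCast / slice_from_natCast); 'max 1 step' only
-- re-states step ≥ 1 (the caller always passes step ≥ 1) so the recursion terminates.
def pvGoB (k step : Nat) (ws : List String) : List String :=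
  if _h : k < ws.length then
    PySem.Str.join " " (ws.take k) :: pvGoB k step (ws.drop (max 1 step))
  else if ws.isEmpty then [] else [PySem.Str.join " " ws]
termination_by ws.length
decreasing_by simp only [List.length_drop]; omega

def split_words_windowed_py_alt (words : List String) (max_words : Int) (overlap_words : Int) : List String :=
  pvGoB (max 0 max_words).toNat (max 1 (max_words - overlap_words)).toNat words

-- ===== PRECONDITION & SPEC =====
-- On inputs with max_words < 0 and len(words) + max_words ≥ 1, A's 'end = start + max_words' is a
-- negative slice bound, so Python's wraparound makes A return segments taken from the END of the list
-- (e.g. ['a b', '', '']); B returns the all-empty segments a non-positive window size means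
-- (e.g. ['', '', '']), which is the intended reading — the wraparound is an accident of slicing.
def D_split_words_windowed_py (words : List String) (max_words : Int) (overlap_words : Int) : Prop :=
  max_words < 0 ∧ 1 ≤ (words.length : Int) + max_words
instance (words : List String) (max_words : Int) (overlap_words : Int) : Decidable (D_split_words_windowed_py words max_words overlap_words) := by unfold D_split_words_windowed_py; infer_instance

def Spec_split_words_windowed_py (words : List String) (max_words : Int) (overlap_words : Int) (out : List String) : Prop := ¬ D_split_words_windowed_py words max_words overlap_words → out = split_words_windowed_py_alt words max_words overlap_words
instance (words : List String) (max_words : Int) (overlap_words : Int) (out : List String) : Decidable (Spec_split_words_windowed_py words max_words overlap_words out) := by unfold Spec_split_words_windowed_py; infer_instance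

def pvDiffWitness_split_words_windowed_py : List String × Int × Int := (["a", "b", "c"], -1, 0)
def pvDiffWitnessOut_split_words_windowed_py : (List String) × (List String) := (["a b", "", ""], ["", "", ""])

-- ===== CLAIM (what is proved, stated in full; the proofs are below) =====
def Claim_unchanged_split_words_windowed_py : Prop := ∀ (words : List String) (max_words : Int) (overlap_words : Int), Dom_split_words_windowed_py words max_words overlap_words → Spec_split_words_windowed_py words max_words overlap_words (split_words_windowed_py words max_words overlap_words)
def Claim_changed_split_words_windowed_py : Prop := Dom_split_words_windowed_py (pvDiffWitness_split_words_windowed_py.1) (pvDiffWitness_split_words_windowed_py.2.1) (pvDiffWitness_split_words_windowed_py.2.2) ∧ D_split_words_windowed_py (pvDiffWitness_split_words_windowed_py.1) (pvDiffWitness_split_words_windowed_py.2.1) (pvDiffWitness_split_words_windowed_py.2.2) ∧ split_words_windowed_py (pvDiffWitness_split_words_windowed_py.1) (pvDiffWitness_split_words_windowed_py.2.1) (pvDiffWitness_split_words_windowed_py.2.2) = pvDiffWitnessOut_split_words_windowed_py.1 ∧ split_words_windowed_py_alt (pvDiffWitness_split_words_windowed_py.1) (pvDiffWitness_split_words_windowed_py.2.1)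 (pvDiffWitness_split_words_windowed_py.2.2) = pvDiffWitnessOut_split_words_windowed_py.2 ∧ pvDiffWitnessOut_split_words_windowed_py.1 ≠ pvDiffWitnessOut_split_words_windowed_py.2

-- ===== LEMMAS AND PROOFS =====

-- range(a, b, s) with 0 < s is empty when b ≤ a
lemma pvRange_pos_nil {a b s : Int} (hs : 0 < s) (h : b ≤ a) :
    PySem.List.pyRange a b s = [] := by
  rw [PySem.List.pyRange_of_pos a b hs, if_neg (not_lt.2 h)]
  simp

-- range(a, b, s) with 0 < s and a < b starts with a and continues as range(a+s, b, s)
lemma pvRange_pos_cons {a b s : Int} (hs : 0 < s) (h : a < b) :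
    PySem.List.pyRange a b s = a :: PySem.List.pyRange (a + s) b s := by
  rw [PySem.List.pyRange_of_pos a b hs, PySem.List.pyRange_of_pos (a + s) b hs,
    if_pos h]
  have hsplit : b - a + s - 1 = (b - a - 1) + s * 1 := by ring
  have hq : (b - a + s - 1) / s = (b - a - 1) / s + 1 := by
    rw [hsplit, Int.add_mul_ediv_left _ _ (by omega : s ≠ 0)]
  have hq0 : 0 ≤ (b - a - 1) / s := Int.ediv_nonneg (by omega) (by omega)
  have hn : ((b - a + s - 1) / s).toNat = ((b - a - 1) / s).toNat + 1 := by omega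
  rw [hn, List.range_succ_eq_map, List.map_cons, List.map_map]
  have htailn : (if a + s < b then ((b - (a + s) + s - 1) / s).toNat else 0)
      = ((b - a - 1) / s).toNat := by
    by_cases hc : a + s < b
    · rw [if_pos hc]; congr 2; ring_nf
    · rw [if_neg hc]
      have : (b - a - 1) / s = 0 := Int.ediv_eq_zero_of_lt (by omega) (by omega)
      omega
  rw [htailn]
  simp only [Nat.cast_zero, mul_zero, add_zero, List.cons.injEq, true_and]
  apply List.map_congr_left
  intro t _
  simp only [Function.comp_apply]
  push_cast
  ring

lemma pvJoin_nil : PySem.Str.join " " ([] : List String) = "" := by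
  simp [PySem.Str.join]

-- the one loop invariant: from any start index s, A's remaining loop equals B's loop on the suffix,
-- provided max_words ≥ 0 or the whole list is shorter than -max_words (the ¬D_ cases)
lemma pvMain (words : List String) (mw step : Int) (hs : 1 ≤ step)
    (hc : 0 ≤ mw ∨ (words.length : Int) + mw ≤ 0) :
    ∀ s : Nat,
      pvLoopA words mw (words.length : Int)
          (PySem.List.pyRange (s : Int) (words.length : Int) step)
        = pvGoB (max 0 mw).toNat step.toNat (words.drop s) := by
  suffices H : ∀ m : Nat, ∀ s : Nat, words.length - s < m →
      pvLoopA words mw (words.length : Int)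
          (PySem.List.pyRange (s : Int) (words.length : Int) step)
        = pvGoB (max 0 mw).toNat step.toNat (words.drop s) by
    intro s; exact H (words.length - s + 1) s (by omega)
  intro m
  induction m with
  | zero => intro s h; omega
  | succ m ih =>
    intro s hm
    by_cases hlt : s < words.length
    · -- s is a live start: unfold one iteration on both sides
      rw [pvRange_pos_cons (by omega) (by exact_mod_cast hlt)]
      rw [pvGoB]
      have hlen : (words.drop s).length = words.length - s := List.length_drop ..
      have hstep1 : max 1 step.toNat = step.toNat := by omega
      have hdd : (words.drop s).drop (max 1 step.toNat) = words.drop (s + step.toNat) := by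
        rw [hstep1, List.drop_drop]
      have hcast : ((s + step.toNat : Nat) : Int) = (s : Int) + step := by
        push_cast; omega
      have hrec := ih (s + step.toNat) (by omega)
      rw [hcast] at hrec
      rcases hc with hmw | hmw
      · -- max_words ≥ 0
        have hk : (max 0 mw).toNat = mw.toNat := by omega
        by_cases hbr : (words.length : Int) ≤ (s : Int) + mw
        · -- A breaks: the tail segment; B's base case emits the whole suffix
          have hmin : min ((s : Int) + mw) (words.length : Int) = (words.length : Int) :=
            min_eq_right hbr
          simp only [pvLoopA, hmin, le_refl, if_pos]
          have hkc : ¬ (max 0 mw).toNat < (words.drop s).length := by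
            rw [hk, hlen]; omega
          rw [dif_neg hkc, if_neg (by simp [List.isEmpty_iff, List.drop_eq_nil_iff]; omega)]
          have hsl : PySem.List.slice words (some (s : Int)) (some (words.length : Int))
              = words.drop s := by
            have := PySem.List.slice_natCast words s words.length
            rw [this, List.take_of_length_le (by rw [hlen])]
          rw [hsl]
        · -- A continues: both emit the k-word window and step to s + step
          rw [not_le] at hbr
          have hmin : min ((s : Int) + mw) (words.length : Int) = (s : Int) + mw :=
            min_eq_left (le_of_lt hbr)
          simp only [pvLoopA, hmin, if_neg (not_le.2 hbr)]
          have hkc : (max 0 mw).toNat < (words.drop s).length := by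
            rw [hk, hlen]; omega
          rw [dif_pos hkc]
          have hsl : PySem.List.slice words (some (s : Int)) (some ((s : Int) + mw))
              = (words.drop s).take (max 0 mw).toNat := by
            rw [PySem.List.slice_toNat words (by omega) (by omega)]
            congr 1; omega
          rw [hsl, hdd, hrec]
      · -- len(words) + max_words ≤ 0: every window is empty on both sides
        have hk : (max 0 mw).toNat = 0 := by omega
        have hmin : min ((s : Int) + mw) (words.length : Int) = (s : Int) + mw := by omega
        simp only [pvLoopA, hmin, if_neg (by omega : ¬ (words.length : Int) ≤ (s : Int) + mw)]
        have hkc : (max 0 mw).toNat < (words.drop s).length := by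
          rw [hk, hlen]; omega
        rw [dif_pos hkc]
        have hsl : PySem.List.slice words (some (s : Int)) (some ((s : Int) + mw)) = [] := by
          apply List.eq_nil_of_length_eq_zero
          rw [PySem.List.length_slice]
          have h1 : PySem.List.clampIdx words.length ((s : Int) + mw) ≤ s := by
            simp only [PySem.List.clampIdx]
            split_ifs <;> omega
          have h2 : PySem.List.clampIdx words.length (s : Int) = s := by
            rw [PySem.List.clampIdx_natCast]; omega
          omega
        rw [hk] at hrec ⊢
        rw [hsl, List.take_zero, hdd, hrec]
    · -- s past the end: both sides are empty
      rw [pvRange_pos_nil (by omega) (by exact_mod_cast Nat.le_of_not_lt hlt)]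
      rw [List.drop_eq_nil_of_le (Nat.le_of_not_lt hlt), pvGoB]
      simp [pvLoopA]

-- ===== VERDICT (by name: the statement is the Claim_ definition above) =====
theorem split_words_windowed_py_spec : Claim_unchanged_split_words_windowed_py := by
  intro words mw ov _ hnd
  have hc : 0 ≤ mw ∨ (words.length : Int) + mw ≤ 0 := by
    by_cases h : 0 ≤ mw
    · exact Or.inl h
    · exact Or.inr (by unfold D_split_words_windowed_py at hnd; omega)
  match words with
  | [] =>
    show ([] : List String) = split_words_windowed_py_alt [] mw ov
    unfold split_words_windowed_py_alt
    rw [pvGoB]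
    simp
  | w :: ws =>
    show split_words_windowed_py (w :: ws) mw ov = split_words_windowed_py_alt (w :: ws) mw ov
    unfold split_words_windowed_py split_words_windowed_py_alt
    have h0 : ((0 : Nat) : Int) = (0 : Int) := by norm_num
    have := pvMain (w :: ws) mw (max 1 (mw - ov)) (le_max_left _ _) hc 0
    rw [h0, List.drop_zero] at this
    exact this

theorem split_words_windowed_py_changed : Claim_changed_split_words_windowed_py := by
  unfold Claim_changed_split_words_windowed_py
  refine ⟨by decide, by decide, by decide, ?_, by decide⟩
  show split_words_windowed_py_alt ["a", "b", "c"] (-1) 0 = ["", "", ""]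
  unfold split_words_windowed_py_alt
  norm_num
  rw [pvGoB]; norm_num [pvJoin_nil]
  rw [pvGoB]; norm_num [pvJoin_nil]
  rw [pvGoB]; norm_num [pvJoin_nil]
  rw [pvGoB]; norm_num
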